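-- pv_equiv track=rewrite | github.com/harry0123/ucopenclass | building_finder.py | times_dictionary
-- ===== SOURCE A (Python) =====
-- def times_dictionary(times_list):
--     result1 = {}
--     for e in times_list:
--         comma = e.find(",")
--         classroom = e[comma + 2:]
--         day_and_hours = e[:comma]
--         if classroom in result1:
--                 result1[classroom].append(day_and_hours)
--         else:
--                 result1[classroom] = [day_and_hours]
--     result2 = {}
--     every_day = ["M", "Tu", "W", "Th", "F"]
--     for classroom in result1:
--         result2[classroom] = {}
--         for day_hour in result1[classroom]:
--             for week_day in every_day:
--                 if week_day in day_hour:
--                     whitespace = day_hour.find(" ")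
--                     hours = day_hour[whitespace+1:]
--                     if week_day in result2[classroom]:
--                         result2[classroom][week_day].append(hours)
--                     else:
--                         result2[classroom][week_day] = [hours]
--     return result2
-- ===== SOURCE B (Python) =====
-- def times_dictionary(times_list):
--     # One pass: no intermediate grouping dict; build the nested dict directly
--     # with setdefault while scanning the schedule strings once.
--     result = {}
--     for e in times_list:
--         comma = e.find(",")
--         classroom = e[comma + 2:]
--         day_and_hours = e[:comma]
--         days = result.setdefault(classroom, {})
--         for week_day in ["M", "Tu", "W", "Th", "F"]:
--             if week_day in day_and_hours:
--                 hours = day_and_hours[day_and_hours.find(" ") + 1:]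
--                 days.setdefault(week_day, []).append(hours)
--     return result
-- ===== Notes on version B (the rewrite author's own statement) =====
-- stated objective: simpler
-- what changed: B collapses A's two differently-shaped passes (a grouping dict result1, then a rebuild into result2) into a single loop over times_list that builds the nested classroom/day dictionary directly with setdefault.
import Mathlib
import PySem

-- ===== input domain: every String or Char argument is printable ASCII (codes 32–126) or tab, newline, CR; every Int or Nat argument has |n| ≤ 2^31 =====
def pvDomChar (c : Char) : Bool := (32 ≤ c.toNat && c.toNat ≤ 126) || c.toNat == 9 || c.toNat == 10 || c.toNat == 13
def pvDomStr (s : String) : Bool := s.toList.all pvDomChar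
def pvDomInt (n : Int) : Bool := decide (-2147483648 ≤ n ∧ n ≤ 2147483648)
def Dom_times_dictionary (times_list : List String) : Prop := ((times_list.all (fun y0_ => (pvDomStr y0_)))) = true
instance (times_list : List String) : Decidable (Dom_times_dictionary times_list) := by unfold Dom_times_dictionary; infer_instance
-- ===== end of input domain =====

-- B collapses A's two passes (grouping dict, then rebuild) into one loop that builds the
-- nested classroom/day dictionary directly with setdefault (simpler, same values).

-- ===== PORT A =====
def pvEveryDay : List String := ["M", "Tu", "W", "Th", "F"]

def times_dictionary (times_list : List String) : List (String × List (String × List String)) :=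
  let result1 : PySem.Dict String (List String) :=
    times_list.foldl (fun d e =>
      let comma := PySem.Str.find e ","
      let classroom := PySem.Str.slice e (some (comma + 2)) none
      let day_and_hours := PySem.Str.slice e none (some comma)
      if d.contains classroom then d.insert classroom (d.getD classroom [] ++ [day_and_hours])
      else d.insert classroom [day_and_hours]) PySem.Dict.empty
  let result2 : PySem.Dict String (PySem.Dict String (List String)) :=
    result1.items.foldl (fun r2 p =>
      let inner : PySem.Dict String (List String) :=
        p.2.foldl (fun inn day_hour =>
          pvEveryDay.foldl (fun inn week_day =>
            if PySem.Str.isIn week_day day_hour then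
              let whitespace := PySem.Str.find day_hour " "
              let hours := PySem.Str.slice day_hour (some (whitespace + 1)) none
              if inn.contains week_day then inn.insert week_day (inn.getD week_day [] ++ [hours])
              else inn.insert week_day [hours]
            else inn) inn) PySem.Dict.empty
      r2.insert p.1 inner) PySem.Dict.empty
  result2.items.map (fun p => (p.1, p.2.items))

-- ===== PORT B =====
-- 'days = result.setdefault(classroom, {})' followed by in-place updates of 'days' is, on the
-- association list, result[classroom] = <weekday loop applied to result.get(classroom, {})>
-- with the key's position kept (new keys append) — exactly Dict.modify.  Likewise
-- 'days.setdefault(wd, []).append(hours)' is days[wd] = days.get(wd, []) + [hours].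
def times_dictionary_alt (times_list : List String) : List (String × List (String × List String)) :=
  let result : PySem.Dict String (PySem.Dict String (List String)) :=
    times_list.foldl (fun res e =>
      let comma := PySem.Str.find e ","
      let classroom := PySem.Str.slice e (some (comma + 2)) none
      let day_and_hours := PySem.Str.slice e none (some comma)
      res.modify classroom PySem.Dict.empty (fun days =>
        pvEveryDay.foldl (fun days week_day =>
          if PySem.Str.isIn week_day day_and_hours then
            days.modify week_day []
              (· ++ [PySem.Str.slice day_and_hours (some (PySem.Str.find day_and_hours " " + 1)) none])
          else days) days)) PySem.Dict.empty
  result.items.map (fun p => (p.1, p.2.items))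

-- ===== PRECONDITION & SPEC =====
def Spec_times_dictionary (times_list : List String) (out : List (String × List (String × List String))) : Prop := out = times_dictionary_alt times_list
instance (times_list : List String) (out : List (String × List (String × List String))) : Decidable (Spec_times_dictionary times_list out) := by unfold Spec_times_dictionary; infer_instance

-- ===== CLAIM (what is proved, stated in full; the proofs are below) =====
def Claim_equal_times_dictionary : Prop := ∀ (times_list : List String), Dom_times_dictionary times_list → Spec_times_dictionary times_list (times_dictionary times_list)

-- ===== LEMMAS AND PROOFS =====

def pvParse (e : String) : String × String :=
  (PySem.Str.slice e (some (PySem.Str.find e "," + 2)) none,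
   PySem.Str.slice e none (some (PySem.Str.find e ",")))

-- the canonical inner (weekday) dict for one classroom's list of day_and_hours strings
def pvInnerM (dhs : List String) : PySem.Dict String (List String) :=
  dhs.foldl (fun inn dh =>
    pvEveryDay.foldl (fun inn wd =>
      if PySem.Str.isIn wd dh then
        inn.modify wd [] (· ++ [PySem.Str.slice dh (some (PySem.Str.find dh " " + 1)) none])
      else inn) inn) PySem.Dict.empty

-- the grouping dict A's behaviour factors through
def pvGroup (parsed : List (String × String)) : PySem.Dict String (List String) :=
  parsed.foldl (fun d p => d.modify p.1 [] (· ++ [p.2])) PySem.Dict.empty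

-- the common canonical value both ports are reduced to
def pvCanon (parsed : List (String × String)) : List (String × List (String × List String)) :=
  (pvGroup parsed).keys.map (fun c =>
    (c, (pvInnerM ((parsed.filter (fun p => p.1 == c)).map (fun p => p.2))).items))

theorem pv_step_eq_modify (d : PySem.Dict String (List String)) (k v : String) :
    (if d.contains k then d.insert k (d.getD k [] ++ [v]) else d.insert k [v])
      = d.modify k [] (· ++ [v]) := by
  by_cases h : d.contains k
  · simp [PySem.Dict.modify, h]
  · simp only [Bool.not_eq_true] at h
    simp [PySem.Dict.modify, h, PySem.Dict.getD_of_not_contains]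

theorem pv_innerA_eq (dhs : List String) :
    dhs.foldl (fun inn day_hour =>
      pvEveryDay.foldl (fun inn week_day =>
        if PySem.Str.isIn week_day day_hour then
          let whitespace := PySem.Str.find day_hour " "
          let hours := PySem.Str.slice day_hour (some (whitespace + 1)) none
          if inn.contains week_day then inn.insert week_day (inn.getD week_day [] ++ [hours])
          else inn.insert week_day [hours]
        else inn) inn) PySem.Dict.empty = pvInnerM dhs := by
  unfold pvInnerM
  apply PySem.List.foldl_congr_mem
  intro inn dh _
  apply PySem.List.foldl_congr_mem
  intro inn wd _
  by_cases h : PySem.Str.isIn wd dh = true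
  · rw [if_pos h, if_pos h]
    exact pv_step_eq_modify inn wd _
  · rw [if_neg h, if_neg h]

theorem pv_A_eq_canon (times_list : List String) :
    times_dictionary times_list = pvCanon (times_list.map pvParse) := by
  have hr1 : times_list.foldl (fun d e =>
      if d.contains (PySem.Str.slice e (some (PySem.Str.find e "," + 2)) none) then
        d.insert (PySem.Str.slice e (some (PySem.Str.find e "," + 2)) none)
          (d.getD (PySem.Str.slice e (some (PySem.Str.find e "," + 2)) none) []
            ++ [PySem.Str.slice e none (some (PySem.Str.find e ","))])
      else d.insert (PySem.Str.slice e (some (PySem.Str.find e "," + 2)) none)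
          [PySem.Str.slice e none (some (PySem.Str.find e ","))]) PySem.Dict.empty
      = pvGroup (times_list.map pvParse) := by
    unfold pvGroup
    rw [List.foldl_map]
    apply PySem.List.foldl_congr_mem
    intro d e _
    exact pv_step_eq_modify d _ _
  show (((times_list.foldl (fun d e =>
      if d.contains (PySem.Str.slice e (some (PySem.Str.find e "," + 2)) none) then
        d.insert (PySem.Str.slice e (some (PySem.Str.find e "," + 2)) none)
          (d.getD (PySem.Str.slice e (some (PySem.Str.find e "," + 2)) none) []
            ++ [PySem.Str.slice e none (some (PySem.Str.find e ","))])
      else d.insert (PySem.Str.slice e (some (PySem.Str.find e "," + 2)) none)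
          [PySem.Str.slice e none (some (PySem.Str.find e ","))]) PySem.Dict.empty).items.foldl
      (fun r2 p =>
        r2.insert p.1 (p.2.foldl (fun inn day_hour =>
          pvEveryDay.foldl (fun inn week_day =>
            if PySem.Str.isIn week_day day_hour then
              if inn.contains week_day then
                inn.insert week_day (inn.getD week_day []
                  ++ [PySem.Str.slice day_hour (some (PySem.Str.find day_hour " " + 1)) none])
              else inn.insert week_day [PySem.Str.slice day_hour (some (PySem.Str.find day_hour " " + 1)) none]
            else inn) inn) PySem.Dict.empty)) PySem.Dict.empty).items.map (fun p => (p.1, p.2.items)))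
    = pvCanon (times_list.map pvParse)
  rw [hr1]
  set parsed := times_list.map pvParse with hp
  have hnodup : (pvGroup parsed).keys.Nodup := by
    unfold pvGroup
    exact PySem.Dict.nodup_keys_foldl_modify_key parsed (fun p => p.1) [] (fun _ p l => l ++ [p.2])
      PySem.Dict.empty (by simp)
  have hfresh := PySem.Dict.items_foldl_insert_fresh (pvGroup parsed).items
    (fun p : String × List String => p.1)
    (fun p => p.2.foldl (fun inn day_hour =>
          pvEveryDay.foldl (fun inn week_day =>
            if PySem.Str.isIn week_day day_hour then
              if inn.contains week_day then
                inn.insert week_day (inn.getD week_day []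
                  ++ [PySem.Str.slice day_hour (some (PySem.Str.find day_hour " " + 1)) none])
              else inn.insert week_day [PySem.Str.slice day_hour (some (PySem.Str.find day_hour " " + 1)) none]
            else inn) inn) PySem.Dict.empty)
    PySem.Dict.empty (by intro a _; simp) hnodup
  rw [hfresh]
  rw [PySem.Dict.items_eq_map_keys (pvGroup parsed) hnodup []]
  unfold pvCanon
  simp only [show (PySem.Dict.empty : PySem.Dict String (PySem.Dict String (List String))).items = [] from rfl,
    List.nil_append, List.map_map]
  apply List.map_congr_left
  intro c _
  simp only [Function.comp]
  rw [pv_innerA_eq]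
  congr 2
  unfold pvGroup
  rw [PySem.Dict.getD_foldl_modify_append]
  simp

-- fold of per-key modify, read back at one key: only that key's updates matter, in order
theorem pv_getD_B_aux (l : List (String × String)) (d : PySem.Dict String (PySem.Dict String (List String))) (c : String) :
    (l.foldl (fun res p =>
      res.modify p.1 PySem.Dict.empty
        (fun days =>
          pvEveryDay.foldl (fun days week_day =>
            if PySem.Str.isIn week_day p.2 then
              days.modify week_day []
                (· ++ [PySem.Str.slice p.2 (some (PySem.Str.find p.2 " " + 1)) none])
            else days) days)) d).getD c PySem.Dict.empty
    = ((l.filter (fun p => p.1 == c)).map (fun p => p.2)).foldl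
        (fun days dh =>
          pvEveryDay.foldl (fun days week_day =>
            if PySem.Str.isIn week_day dh then
              days.modify week_day []
                (· ++ [PySem.Str.slice dh (some (PySem.Str.find dh " " + 1)) none])
            else days) days) (d.getD c PySem.Dict.empty) := by
  induction l generalizing d with
  | nil => rfl
  | cons p t ih =>
    simp only [List.foldl_cons, List.filter_cons]
    rw [ih]
    by_cases h : p.1 = c
    · subst h
      simp [PySem.Dict.getD_modify_self]
    · have hne : c ≠ p.1 := fun hh => h hh.symm
      simp [h, PySem.Dict.getD_modify_of_ne _ _ _ hne]

theorem pv_getD_B (parsed : List (String × String)) (c : String) :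
    (parsed.foldl (fun res p =>
      res.modify p.1 PySem.Dict.empty
        (fun days =>
          pvEveryDay.foldl (fun days week_day =>
            if PySem.Str.isIn week_day p.2 then
              days.modify week_day []
                (· ++ [PySem.Str.slice p.2 (some (PySem.Str.find p.2 " " + 1)) none])
            else days) days)) PySem.Dict.empty).getD c PySem.Dict.empty
    = pvInnerM ((parsed.filter (fun p => p.1 == c)).map (fun p => p.2)) := by
  rw [pv_getD_B_aux]
  rfl

theorem pv_B_eq_canon (times_list : List String) :
    times_dictionary_alt times_list = pvCanon (times_list.map pvParse) := by
  show ((times_list.foldl (fun res e =>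
      res.modify (PySem.Str.slice e (some (PySem.Str.find e "," + 2)) none) PySem.Dict.empty
        (fun days =>
          pvEveryDay.foldl (fun days week_day =>
            if PySem.Str.isIn week_day (PySem.Str.slice e none (some (PySem.Str.find e ","))) then
              days.modify week_day []
                (· ++ [PySem.Str.slice (PySem.Str.slice e none (some (PySem.Str.find e ",")))
                  (some (PySem.Str.find (PySem.Str.slice e none (some (PySem.Str.find e ","))) " " + 1)) none])
            else days) days)) PySem.Dict.empty).items.map (fun p => (p.1, p.2.items)))
    = pvCanon (times_list.map pvParse)
  have hB : times_list.foldl (fun res e =>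
      res.modify (PySem.Str.slice e (some (PySem.Str.find e "," + 2)) none) PySem.Dict.empty
        (fun days =>
          pvEveryDay.foldl (fun days week_day =>
            if PySem.Str.isIn week_day (PySem.Str.slice e none (some (PySem.Str.find e ","))) then
              days.modify week_day []
                (· ++ [PySem.Str.slice (PySem.Str.slice e none (some (PySem.Str.find e ",")))
                  (some (PySem.Str.find (PySem.Str.slice e none (some (PySem.Str.find e ","))) " " + 1)) none])
            else days) days)) PySem.Dict.empty
    = (times_list.map pvParse).foldl (fun res p =>
      res.modify p.1 PySem.Dict.empty
        (fun days =>
          pvEveryDay.foldl (fun days week_day =>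
            if PySem.Str.isIn week_day p.2 then
              days.modify week_day []
                (· ++ [PySem.Str.slice p.2 (some (PySem.Str.find p.2 " " + 1)) none])
            else days) days)) PySem.Dict.empty := by
    rw [List.foldl_map]
    rfl
  rw [hB]
  set parsed := times_list.map pvParse with hp
  have hnodup : ((parsed.foldl (fun res p =>
      res.modify p.1 PySem.Dict.empty
        (fun days =>
          pvEveryDay.foldl (fun days week_day =>
            if PySem.Str.isIn week_day p.2 then
              days.modify week_day []
                (· ++ [PySem.Str.slice p.2 (some (PySem.Str.find p.2 " " + 1)) none])
            else days) days)) PySem.Dict.empty)).keys.Nodup := by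
    exact PySem.Dict.nodup_keys_foldl_modify_key parsed (fun p => p.1) PySem.Dict.empty
      (fun _ p days => pvEveryDay.foldl (fun days week_day =>
            if PySem.Str.isIn week_day p.2 then
              days.modify week_day []
                (· ++ [PySem.Str.slice p.2 (some (PySem.Str.find p.2 " " + 1)) none])
            else days) days)
      PySem.Dict.empty (by simp)
  have hkeys : ((parsed.foldl (fun res p =>
      res.modify p.1 PySem.Dict.empty
        (fun days =>
          pvEveryDay.foldl (fun days week_day =>
            if PySem.Str.isIn week_day p.2 then
              days.modify week_day []
                (· ++ [PySem.Str.slice p.2 (some (PySem.Str.find p.2 " " + 1)) none])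
            else days) days)) PySem.Dict.empty)).keys = (pvGroup parsed).keys := by
    unfold pvGroup
    rw [PySem.Dict.keys_foldl_modify_key parsed (fun p => p.1) PySem.Dict.empty
      (fun _ p days => pvEveryDay.foldl (fun days week_day =>
            if PySem.Str.isIn week_day p.2 then
              days.modify week_day []
                (· ++ [PySem.Str.slice p.2 (some (PySem.Str.find p.2 " " + 1)) none])
            else days) days)]
    rw [PySem.Dict.keys_foldl_modify_key parsed (fun p => p.1) [] (fun _ p l => l ++ [p.2])]
    simp [PySem.Dict.keys_empty]
  rw [PySem.Dict.items_eq_map_keys _ hnodup PySem.Dict.empty, hkeys]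
  unfold pvCanon
  simp only [List.map_map]
  apply List.map_congr_left
  intro c _
  simp only [Function.comp]
  rw [pv_getD_B parsed c]

-- ===== VERDICT (by name: the statement is the Claim_ definition above) =====
theorem times_dictionary_spec : Claim_equal_times_dictionary := by
  intro times_list _
  unfold Spec_times_dictionary
  exact (pv_A_eq_canon times_list).trans (pv_B_eq_canon times_list).symm
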